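-- pv_equiv track=rewrite | github.com/MaximHelio/SWExpertacademy | 2021-02-16/1210_Ladder1.py | imugi
-- ===== SOURCE A (Python) =====
-- def imugi(arr, row, column):
--     col_end = 0
--     row_end = 0
--     #row, column을 미리 초기화
--
--     for i in range(row, -1, -1):  # 시작점부터 세로로 올라가며 좌우의 1을 검사/ 혹은 이미 꼭대기인지 검사
--
--         if column >= 1 and arr[i][column - 1] == 1:  # 왼쪽에 사다리를 만난다면
--             for j in range(column - 1, -1, -1):  # 가로로 왼쪽 끝까지 검사
--                 if arr[i - 1][j] == 1:
--                     return imugi(arr, i - 1, j)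
--                     # row_end = i-1
--                     # col_end = j
--                     # break
--             # break
--
--         elif column <= 98 and arr[i][column + 1] == 1:  # 오른쪽에 사다리를 만난다면
--             for j in range(column + 1, 100, 1):  # 가로로 오른쪽 끝까지 검사
--                 if arr[i - 1][j] == 1:
--                     return imugi(arr, i - 1, j)
--                     # row_end = i-1
--                     # col_end = j
--                     # break
--             # break
--
--         elif i == 0:
--             return column
-- ===== SOURCE B (Python) =====
-- def imugi(arr, row, column):
--     # iterative version: explicit row/column state, restart the upward scan after each move
--     while True:
--         moved = False
--         for i in range(row, -1, -1):
--             if column >= 1 and arr[i][column - 1] == 1: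
--                 j = next((j for j in range(column - 1, -1, -1) if arr[i - 1][j] == 1), None)
--                 if j is not None:
--                     row, column = i - 1, j
--                     moved = True
--                     break
--             elif column <= 98 and arr[i][column + 1] == 1:
--                 j = next((j for j in range(column + 1, 100) if arr[i - 1][j] == 1), None)
--                 if j is not None:
--                     row, column = i - 1, j
--                     moved = True
--                     break
--             elif i == 0:
--                 return column
--         if not moved:
--             return None
-- ===== Notes on version B (the rewrite author's own statement) =====
-- stated objective: alternative
-- what changed: The tail recursion is replaced by an explicit while-loop keeping mutable row/column state, and each inner rung scan becomes a find-first expression instead of a loop containing the recursive return.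
-- outside the precondition, e.g. on imugi([[1, 1], [1, 1]], 1, 0): A returns None, B returns None
import Mathlib
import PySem

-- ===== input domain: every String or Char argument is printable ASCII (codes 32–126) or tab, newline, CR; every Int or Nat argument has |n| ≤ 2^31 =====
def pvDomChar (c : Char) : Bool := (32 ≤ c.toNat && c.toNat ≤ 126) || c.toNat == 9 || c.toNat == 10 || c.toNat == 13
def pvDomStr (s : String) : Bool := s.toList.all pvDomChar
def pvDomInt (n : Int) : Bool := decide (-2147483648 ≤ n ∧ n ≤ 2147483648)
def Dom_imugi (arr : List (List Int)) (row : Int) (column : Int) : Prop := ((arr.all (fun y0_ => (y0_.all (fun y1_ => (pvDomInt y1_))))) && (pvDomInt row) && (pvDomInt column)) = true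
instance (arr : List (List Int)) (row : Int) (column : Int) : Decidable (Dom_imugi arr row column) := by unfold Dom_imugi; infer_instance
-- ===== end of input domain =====

-- B replaces A's tail recursion by an explicit iteration over a (row, column) state; same scan order.

-- ===== PORT A =====
-- arr[i][j] with Python negative-index semantics; the .getD 0 default is never
-- reached inside Pre_imugi (all accesses are in range there).
def imugiAt (arr : List (List Int)) (i j : Int) : Int :=
  ((PySem.List.pyGet? arr i).bind (fun r => PySem.List.pyGet? r j)).getD 0

-- the inner 'for j in range(...): if arr[i-1][j] == 1: return imugi(arr, i-1, j)'
-- loops of A: find the first j in the range with arr[r][j] == 1 (r = i-1)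
def imugiFind (arr : List (List Int)) (r : Int) : List Int → Option Int
  | [] => none
  | j :: rest => if imugiAt arr r j = 1 then some j else imugiFind arr r rest

mutual
-- A's recursive body; fuel (row+1).toNat + 1 bounds the recursion depth (row strictly decreases)
def imugiGo (arr : List (List Int)) : Nat → Int → Int → Option Int
  | 0, _, _ => none
  | f + 1, row, column => imugiLoop arr f column (PySem.List.pyRange row (-1) (-1))
termination_by f _ _ => (f, 0)

-- 'for i in range(row, -1, -1): ...' of A, falling off the end returns None
def imugiLoop (arr : List (List Int)) (f : Nat) (column : Int) : List Int → Option Int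
  | [] => none
  | i :: rest =>
    if 1 ≤ column ∧ imugiAt arr i (column - 1) = 1 then
      match imugiFind arr (i - 1) (PySem.List.pyRange (column - 1) (-1) (-1)) with
      | some j => imugiGo arr f (i - 1) j
      | none => imugiLoop arr f column rest
    else if column ≤ 98 ∧ imugiAt arr i (column + 1) = 1 then
      match imugiFind arr (i - 1) (PySem.List.pyRange (column + 1) 100 1) with
      | some j => imugiGo arr f (i - 1) j
      | none => imugiLoop arr f column rest
    else if i = 0 then some column
    else imugiLoop arr f column rest
termination_by js => (f, js.length + 1)
end

def imugi (arr : List (List Int)) (row : Int) (column : Int) : Option Int :=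
  imugiGo arr ((row + 1).toNat + 1) row column

-- ===== PORT B =====
def imugiCell (arr : List (List Int)) (i j : Int) : Int :=
  ((PySem.List.pyGet? arr i).bind (fun r => PySem.List.pyGet? r j)).getD 0

-- one pass of B's inner 'for i' loop: either the new (row, column) state (.inl)
-- or a final result (.inr): the top column, or none when the scan falls through
def imugiStep (arr : List (List Int)) (column : Int) : List Int → (Int × Int) ⊕ Option Int
  | [] => Sum.inr none
  | i :: rest =>
    if 1 ≤ column ∧ imugiCell arr i (column - 1) = 1 then
      match (PySem.List.pyRange (column - 1) (-1) (-1)).find?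
              (fun j => imugiCell arr (i - 1) j == 1) with
      | some j => Sum.inl (i - 1, j)
      | none => imugiStep arr column rest
    else if column ≤ 98 ∧ imugiCell arr i (column + 1) = 1 then
      match (PySem.List.pyRange (column + 1) 100 1).find?
              (fun j => imugiCell arr (i - 1) j == 1) with
      | some j => Sum.inl (i - 1, j)
      | none => imugiStep arr column rest
    else if i = 0 then Sum.inr (some column)
    else imugiStep arr column rest

-- B's 'while True': iterate imugiStep on the (row, column) state; the fuel
-- (row+1).toNat + 1 bounds the number of passes (row strictly decreases)
def imugiIter (arr : List (List Int)) : Nat → Int → Int → Option Int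
  | 0, _, _ => none
  | f + 1, row, column =>
    match imugiStep arr column (PySem.List.pyRange row (-1) (-1)) with
    | Sum.inl (r, c) => imugiIter arr f r c
    | Sum.inr v => v

def imugi_alt (arr : List (List Int)) (row : Int) (column : Int) : Option Int :=
  imugiIter arr ((row + 1).toNat + 1) row column

-- ===== PRECONDITION & SPEC =====
-- Inputs on which A raises no IndexError: a negative start row (empty scan), the puzzle's
-- natural 100-wide grid, or a walk that meets no adjacent rung (both guard cells exist and
-- differ from 1 at every scanned row); Pre_ also excludes some inputs where a rung scan starts
-- on a non-100-wide grid yet happens to finish without raising, on which both programs agree.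
def Pre_imugi (arr : List (List Int)) (row : Int) (column : Int) : Prop :=
  row < 0 ∨
  (0 ≤ row ∧ row < arr.length ∧ 0 ≤ column ∧ column < 100 ∧ ∀ r ∈ arr, r.length = 100) ∨
  (0 ≤ row ∧ row < arr.length ∧
    ∀ i ∈ PySem.List.pyRange row (-1) (-1),
      (1 ≤ column →
        ((PySem.List.pyGet? arr i).bind (fun r => PySem.List.pyGet? r (column - 1))).isSome ∧
        (PySem.List.pyGet? arr i).bind (fun r => PySem.List.pyGet? r (column - 1)) ≠ some 1) ∧
      (column ≤ 98 →
        ((PySem.List.pyGet? arr i).bind (fun r => PySem.List.pyGet? r (column + 1))).isSome ∧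
        (PySem.List.pyGet? arr i).bind (fun r => PySem.List.pyGet? r (column + 1)) ≠ some 1))
instance (arr : List (List Int)) (row : Int) (column : Int) : Decidable (Pre_imugi arr row column) := by unfold Pre_imugi; infer_instance

def pvWitness_imugi : List (List Int) × Int × Int := ([List.replicate 100 (0 : Int)], 0, 0)

def Spec_imugi (arr : List (List Int)) (row : Int) (column : Int) (out : Option Int) : Prop := out = imugi_alt arr row column
instance (arr : List (List Int)) (row : Int) (column : Int) (out : Option Int) : Decidable (Spec_imugi arr row column out) := by unfold Spec_imugi; infer_instance

-- ===== CLAIM (what is proved, stated in full; the proofs are below) =====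
def Claim_equal_imugi : Prop := ∀ (arr : List (List Int)) (row : Int) (column : Int), Dom_imugi arr row column → Pre_imugi arr row column → Spec_imugi arr row column (imugi arr row column)

-- ===== LEMMAS AND PROOFS =====

theorem imugiCell_eq (arr : List (List Int)) (i j : Int) : imugiCell arr i j = imugiAt arr i j := rfl

theorem imugiFind_eq_find? (arr : List (List Int)) (r : Int) (js : List Int) :
    imugiFind arr r js = js.find? (fun j => imugiCell arr r j == 1) := by
  induction js with
  | nil => rfl
  | cons j rest ih =>
    by_cases h : imugiAt arr r j = 1
    · have hb : (imugiCell arr r j == 1) = true := by simp [imugiCell_eq, h]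
      simp [imugiFind, List.find?, h, hb]
    · have hb : (imugiCell arr r j == 1) = false := by simp [imugiCell_eq, h]
      simp [imugiFind, List.find?, h, hb, ih]

theorem imugiLoop_eq_step (arr : List (List Int)) (f : Nat)
    (IH : ∀ r c, imugiGo arr f r c = imugiIter arr f r c) (column : Int) (js : List Int) :
    imugiLoop arr f column js =
      (match imugiStep arr column js with
       | Sum.inl (r, c) => imugiIter arr f r c
       | Sum.inr v => v) := by
  induction js with
  | nil => simp [imugiLoop, imugiStep]
  | cons i rest ih =>
    rw [imugiLoop, imugiStep]
    by_cases h1 : 1 ≤ column ∧ imugiAt arr i (column - 1) = 1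
    · have h1' : 1 ≤ column ∧ imugiCell arr i (column - 1) = 1 := h1
      rw [if_pos h1, if_pos h1', ← imugiFind_eq_find?]
      cases imugiFind arr (i - 1) (PySem.List.pyRange (column - 1) (-1) (-1)) with
      | some j => exact IH _ _
      | none => exact ih
    · have h1' : ¬ (1 ≤ column ∧ imugiCell arr i (column - 1) = 1) := h1
      rw [if_neg h1, if_neg h1']
      by_cases h2 : column ≤ 98 ∧ imugiAt arr i (column + 1) = 1
      · have h2' : column ≤ 98 ∧ imugiCell arr i (column + 1) = 1 := h2
        rw [if_pos h2, if_pos h2', ← imugiFind_eq_find?]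
        cases imugiFind arr (i - 1) (PySem.List.pyRange (column + 1) 100 1) with
        | some j => exact IH _ _
        | none => exact ih
      · have h2' : ¬ (column ≤ 98 ∧ imugiCell arr i (column + 1) = 1) := h2
        rw [if_neg h2, if_neg h2']
        by_cases h3 : i = 0
        · rw [if_pos h3, if_pos h3]
        · rw [if_neg h3, if_neg h3]; exact ih

theorem imugiGo_eq_iter (arr : List (List Int)) (f : Nat) :
    ∀ row column, imugiGo arr f row column = imugiIter arr f row column := by
  induction f with
  | zero => intro row column; simp [imugiGo, imugiIter]
  | succ f ih =>
    intro row column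
    rw [imugiGo, imugiIter]
    exact imugiLoop_eq_step arr f ih column _

-- ===== VERDICT (by name: the statement is the Claim_ definition above) =====
theorem imugi_spec : Claim_equal_imugi := by
  intro arr row column _ _
  unfold Spec_imugi imugi imugi_alt
  exact imugiGo_eq_iter arr _ row column
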